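-- pv_equiv track=rewrite | github.com/pypi-data/pypi-mirror-36 | packages/PyOPUS/PyOPUS-0.9.tar.gz/PyOPUS-0.9/pyopus/gui/table.py | selectionRange
-- ===== SOURCE A (Python) =====
-- def selectionRange(ndxs):
-- 	rmin=None
-- 	rmax=None
-- 	cmin=None
-- 	cmax=None
-- 	for row, col in ndxs:
-- 		rmin=row if rmin is None or row<rmin else rmin
-- 		rmax=row if rmax is None or row>rmax else rmax
-- 		cmin=col if cmin is None or col<cmin else cmin
-- 		cmax=col if cmax is None or col>cmax else cmax
--
-- 	h=(rmax-rmin+1) if rmax is not None else 0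
-- 	w=(cmax-cmin+1) if cmax is not None else 0
--
-- 	return rmin, cmin, h, w
-- ===== SOURCE B (Python) =====
-- def selectionRange(ndxs):
--     lst = list(ndxs)
--     if not lst:
--         return None, None, 0, 0
--     rows, cols = zip(*lst)
--     rmin, rmax = min(rows), max(rows)
--     cmin, cmax = min(cols), max(cols)
--     return rmin, cmin, rmax - rmin + 1, cmax - cmin + 1
-- ===== Notes on version B (the rewrite author's own statement) =====
-- stated objective: simpler
-- what changed: Replaces the fused loop carrying four running None-seeded min/max accumulators with an empty-list early return, unzip into rows/cols, and four builtin min/max reductions.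
import Mathlib
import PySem

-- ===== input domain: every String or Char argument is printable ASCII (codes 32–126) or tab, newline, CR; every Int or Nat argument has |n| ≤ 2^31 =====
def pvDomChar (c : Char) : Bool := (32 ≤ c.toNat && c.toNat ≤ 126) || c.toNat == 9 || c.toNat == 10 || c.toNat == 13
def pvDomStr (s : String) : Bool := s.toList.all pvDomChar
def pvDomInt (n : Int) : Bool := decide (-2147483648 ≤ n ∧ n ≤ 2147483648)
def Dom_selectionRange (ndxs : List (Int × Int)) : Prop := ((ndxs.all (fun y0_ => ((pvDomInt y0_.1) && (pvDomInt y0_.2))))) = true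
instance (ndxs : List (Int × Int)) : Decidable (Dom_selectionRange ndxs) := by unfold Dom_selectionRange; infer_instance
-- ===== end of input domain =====

-- B: empty-case early return, unzip into rows/cols, then four builtin min/max reductions (simpler decomposition, same O(n) cost).

-- ===== PORT A =====
-- one loop step of A's for-loop: update the four None-seeded running accumulators
def pvStepA (st : Option Int × Option Int × Option Int × Option Int) (p : Int × Int) :
    Option Int × Option Int × Option Int × Option Int :=
  let (rmin, rmax, cmin, cmax) := st
  let (row, col) := p
  (if rmin.isNone || (rmin.all (fun m => row < m)) then some row else rmin,
   if rmax.isNone || (rmax.all (fun m => row > m)) then some row else rmax,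
   if cmin.isNone || (cmin.all (fun m => col < m)) then some col else cmin,
   if cmax.isNone || (cmax.all (fun m => col > m)) then some col else cmax)

def selectionRange (ndxs : List (Int × Int)) : Option Int × Option Int × Int × Int :=
  let st := ndxs.foldl pvStepA (none, none, none, none)
  let (rmin, rmax, cmin, cmax) := st
  let h : Int := match rmax, rmin with | some ra, some rb => ra - rb + 1 | _, _ => 0
  let w : Int := match cmax, cmin with | some ca, some cb => ca - cb + 1 | _, _ => 0
  (rmin, cmin, h, w)

-- ===== PORT B =====
def selectionRange_alt (ndxs : List (Int × Int)) : Option Int × Option Int × Int × Int :=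
  match ndxs with
  | [] => (none, none, 0, 0)
  | (r, c) :: rest =>
    let rows := rest.map Prod.fst
    let cols := rest.map Prod.snd
    let rmin := rows.foldl min r
    let rmax := rows.foldl max r
    let cmin := cols.foldl min c
    let cmax := cols.foldl max c
    (some rmin, some cmin, rmax - rmin + 1, cmax - cmin + 1)

-- ===== PRECONDITION & SPEC =====
def Spec_selectionRange (ndxs : List (Int × Int)) (out : Option Int × Option Int × Int × Int) : Prop := out = selectionRange_alt ndxs
instance (ndxs : List (Int × Int)) (out : Option Int × Option Int × Int × Int) : Decidable (Spec_selectionRange ndxs out) := by unfold Spec_selectionRange; infer_instance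

-- ===== CLAIM (what is proved, stated in full; the proofs are below) =====
def Claim_equal_selectionRange : Prop := ∀ (ndxs : List (Int × Int)), Dom_selectionRange ndxs → Spec_selectionRange ndxs (selectionRange ndxs)

-- ===== LEMMAS AND PROOFS =====
theorem pvFoldA_some (rest : List (Int × Int)) (a b c d : Int) :
    rest.foldl pvStepA (some a, some b, some c, some d) =
      (some ((rest.map Prod.fst).foldl min a), some ((rest.map Prod.fst).foldl max b),
       some ((rest.map Prod.snd).foldl min c), some ((rest.map Prod.snd).foldl max d)) := by
  induction rest generalizing a b c d with
  | nil => rfl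
  | cons p ps ih =>
    obtain ⟨r, cc⟩ := p
    simp only [List.foldl_cons, List.map_cons, pvStepA, Option.isNone_some, Option.all_some,
      Bool.false_or]
    rw [show (if (decide (r < a)) = true then some r else some a) = some (min a r) by
          split_ifs with h <;> simp_all [min_def] <;> try omega,
        show (if (decide (r > b)) = true then some r else some b) = some (max b r) by
          split_ifs with h <;> simp_all [max_def] <;> try omega,
        show (if (decide (cc < c)) = true then some cc else some c) = some (min c cc) by
          split_ifs with h <;> simp_all [min_def] <;> try omega,
        show (if (decide (cc > d)) = true then some cc else some d) = some (max d cc) by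
          split_ifs with h <;> simp_all [max_def] <;> try omega]
    exact ih _ _ _ _

-- ===== VERDICT (by name: the statement is the Claim_ definition above) =====
theorem selectionRange_spec : Claim_equal_selectionRange := by
  intro ndxs _
  unfold Spec_selectionRange
  cases ndxs with
  | nil => rfl
  | cons p rest =>
    obtain ⟨r, c⟩ := p
    simp only [selectionRange, selectionRange_alt, List.foldl_cons]
    rw [show pvStepA (none, none, none, none) (r, c) = (some r, some r, some c, some c) from rfl,
        pvFoldA_some]
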